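-- pv_equiv track=rewrite | github.com/v3U9VZIe3Ek/WasmHint | utils.py | convert2type_topk
-- ===== SOURCE A (Python) =====
-- def convert2type_topk(output_ids, idx2ty):
--     out_lists = []
--     for per_output_ids in output_ids:
--         per_out_list = []
--         for ids in per_output_ids:
--             tmp_out = ''
--             for i in ids:
--                 token = idx2ty[i]
--                 if token == '<TY_SOS>':
--                     continue
--                 elif token == '<TY_EOS>':
--                     break
--                 else:
--                     tmp_out += token + ' '
--             tmp_out = tmp_out.strip()
--             per_out_list.append(tmp_out)
--         out_lists.append(per_out_list)
--     return out_lists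
-- ===== SOURCE B (Python) =====
-- def convert2type_topk(output_ids, idx2ty):
--     # Precompute id-level index sets for the sentinel tokens once, so the
--     # per-id work is integer set membership instead of string comparisons.
--     eos_ids = {i for i, t in idx2ty.items() if t == '<TY_EOS>'}
--     sos_ids = {i for i, t in idx2ty.items() if t == '<TY_SOS>'}
--
--     def cut(ids):
--         for k, i in enumerate(ids):
--             if i in eos_ids:
--                 return ids[:k]
--         return list(ids)
--
--     return [[' '.join(idx2ty[i] for i in cut(ids) if i not in sos_ids).strip()
--              for ids in per_output_ids]
--             for per_output_ids in output_ids]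
-- ===== Notes on version B (the rewrite author's own statement) =====
-- stated objective: alternative
-- what changed: B first builds a reverse index of the two sentinel tokens (the sets of ids mapping to '<TY_EOS>' and '<TY_SOS>'), then decodes each sequence by staged passes on the ids themselves - cut at the first EOS id, filter out SOS ids, look up and space-join - instead of A's single accumulator loop that looks up every id and compares the token strings with continue/break.
-- outside the precondition, e.g. on convert2type_topk([[[0, 2, 5]]], {0: 'int', 2: '<TY_EOS>'}): A returns [['int']], B returns [['int']]
import Mathlib
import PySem

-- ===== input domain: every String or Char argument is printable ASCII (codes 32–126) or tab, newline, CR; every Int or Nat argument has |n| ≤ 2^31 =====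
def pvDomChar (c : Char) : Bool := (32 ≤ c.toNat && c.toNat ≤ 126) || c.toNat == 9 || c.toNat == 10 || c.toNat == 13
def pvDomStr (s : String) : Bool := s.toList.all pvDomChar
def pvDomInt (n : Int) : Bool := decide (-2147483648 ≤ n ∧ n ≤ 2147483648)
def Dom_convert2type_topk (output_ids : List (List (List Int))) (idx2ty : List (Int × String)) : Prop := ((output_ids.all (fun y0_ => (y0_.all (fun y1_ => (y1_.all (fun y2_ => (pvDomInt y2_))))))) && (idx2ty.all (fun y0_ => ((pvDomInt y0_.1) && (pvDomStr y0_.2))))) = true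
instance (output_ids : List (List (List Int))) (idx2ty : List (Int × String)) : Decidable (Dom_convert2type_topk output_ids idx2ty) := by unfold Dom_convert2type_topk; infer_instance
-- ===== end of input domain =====

-- B precomputes the id-level sets of the EOS/SOS sentinel tokens once (a reverse index over
-- the dict), then builds each string by cut-at-EOS-id / filter-SOS-id / join; A instead
-- compares the looked-up token string inside a growing string-accumulator loop. Same cost.

-- ===== PORT A =====
-- dict lookup idx2ty[i]; none = KeyError (excluded by Pre_)
def pvLookup (idx2ty : List (Int × String)) (i : Int) : Option String :=
  PySem.Dict.get? (PySem.Dict.mk idx2ty) i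

-- A's inner 'for i in ids' loop building tmp_out (continue on SOS, break on EOS)
def pvAInner (idx2ty : List (Int × String)) : List Int → List Char
  | [] => []
  | i :: rest =>
    match pvLookup idx2ty i with
    | none => []  -- KeyError in Python; unreachable under Pre_
    | some token =>
      if token = "<TY_SOS>" then pvAInner idx2ty rest
      else if token = "<TY_EOS>" then []
      else token.toList ++ [' '] ++ pvAInner idx2ty rest

def convert2type_topk (output_ids : List (List (List Int))) (idx2ty : List (Int × String)) : List (List String) :=
  output_ids.foldl (fun out_lists per_output_ids =>
    out_lists ++ [per_output_ids.foldl (fun per_out_list ids =>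
      per_out_list ++ [String.ofList (PySem.Chars.strip (pvAInner idx2ty ids))]) []]) []

-- ===== PORT B =====
-- eos_ids = {i for i, t in idx2ty.items() if t == '<TY_EOS>'}
def pvEosIds (idx2ty : List (Int × String)) : PySem.Set Int :=
  PySem.Set.ofList (((PySem.Dict.mk idx2ty).items.filter (fun p => p.2 == "<TY_EOS>")).map Prod.fst)

-- sos_ids = {i for i, t in idx2ty.items() if t == '<TY_SOS>'}
def pvSosIds (idx2ty : List (Int × String)) : PySem.Set Int :=
  PySem.Set.ofList (((PySem.Dict.mk idx2ty).items.filter (fun p => p.2 == "<TY_SOS>")).map Prod.fst)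

-- cut(ids): the prefix of ids before the first id in eos_ids (the enumerate loop + slice)
def pvCut (eos : PySem.Set Int) : List Int → List Int
  | [] => []
  | i :: rest => if PySem.Set.contains eos i then [] else i :: pvCut eos rest

-- idx2ty[i] in the join's generator; "" unreachable under Pre_ (KeyError in Python)
def pvTok (idx2ty : List (Int × String)) (i : Int) : List Char :=
  ((PySem.Dict.mk idx2ty).get? i).getD "" |>.toList

-- ' '.join(idx2ty[i] for i in cut(ids) if i not in sos_ids).strip()
def pvDecodeB (idx2ty : List (Int × String)) (eos sos : PySem.Set Int) (ids : List Int) : String :=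
  String.ofList (PySem.Chars.strip (PySem.Chars.join [' ']
    (((pvCut eos ids).filter (fun i => !(PySem.Set.contains sos i))).map (pvTok idx2ty))))

def convert2type_topk_alt (output_ids : List (List (List Int))) (idx2ty : List (Int × String)) : List (List String) :=
  let eos := pvEosIds idx2ty
  let sos := pvSosIds idx2ty
  output_ids.map (fun per_output_ids => per_output_ids.map (pvDecodeB idx2ty eos sos))

-- ===== PRECONDITION & SPEC =====
-- Pre_ excludes (a) inputs where some id is missing from idx2ty (A raises KeyError there;
-- slightly conservative: it also requires keys for ids after the first EOS, which A never
-- looks up — on those excluded inputs A and B agree anyway), and (b) idx2ty with duplicate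
-- keys, which no Python dict can produce (the assoc list is the image of a dict).
def Pre_convert2type_topk (output_ids : List (List (List Int))) (idx2ty : List (Int × String)) : Prop :=
  (∀ per ∈ output_ids, ∀ ids ∈ per, ∀ i ∈ ids, (PySem.Dict.mk idx2ty).contains i = true) ∧
    (idx2ty.map Prod.fst).Nodup
instance (output_ids : List (List (List Int))) (idx2ty : List (Int × String)) : Decidable (Pre_convert2type_topk output_ids idx2ty) := by unfold Pre_convert2type_topk; infer_instance

def pvWitness_convert2type_topk : List (List (List Int)) × (List (Int × String)) :=
  ([[[0, 1, 2], [2]], [[1]]], [(0, "int"), (1, "<TY_SOS>"), (2, "<TY_EOS>")])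

def Spec_convert2type_topk (output_ids : List (List (List Int))) (idx2ty : List (Int × String)) (out : List (List String)) : Prop := out = convert2type_topk_alt output_ids idx2ty
instance (output_ids : List (List (List Int))) (idx2ty : List (Int × String)) (out : List (List String)) : Decidable (Spec_convert2type_topk output_ids idx2ty out) := by unfold Spec_convert2type_topk; infer_instance

-- ===== CLAIM (what is proved, stated in full; the proofs are below) =====
def Claim_equal_convert2type_topk : Prop := ∀ (output_ids : List (List (List Int))) (idx2ty : List (Int × String)), Dom_convert2type_topk output_ids idx2ty → Pre_convert2type_topk output_ids idx2ty → Spec_convert2type_topk output_ids idx2ty (convert2type_topk output_ids idx2ty)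

-- ===== LEMMAS AND PROOFS =====

-- membership in a sentinel id-set ↔ the dict maps the id to that sentinel (needs Nodup keys)
theorem mem_sentinel_set (idx2ty : List (Int × String)) (s : String) (i : Int)
    (hnd : (idx2ty.map Prod.fst).Nodup) :
    PySem.Set.contains
        (PySem.Set.ofList (((PySem.Dict.mk idx2ty).items.filter (fun p => p.2 == s)).map Prod.fst)) i
      = true ↔ (PySem.Dict.mk idx2ty).get? i = some s := by
  have hk : ((PySem.Dict.mk idx2ty).keys).Nodup := by
    simpa [PySem.Dict.keys] using hnd
  rw [PySem.Set.contains_iff, PySem.Set.mem_ofList]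
  constructor
  · rintro h
    obtain ⟨⟨k, v⟩, hmem, rfl⟩ := List.mem_map.mp h
    have hv : v = s := by simpa using (List.mem_filter.mp hmem).2
    subst hv
    exact PySem.Dict.get?_of_mem_items _ (List.mem_filter.mp hmem).1 hk
  · intro h
    exact List.mem_map.mpr ⟨(i, s),
      List.mem_filter.mpr ⟨PySem.Dict.mem_items_of_get?_eq_some _ h, by simp⟩, rfl⟩

-- A's accumulated string is B's kept-token list with a space glued after each token
theorem pvAInner_eq (idx2ty : List (Int × String)) (hnd : (idx2ty.map Prod.fst).Nodup)
    (ids : List Int) (h : ∀ i ∈ ids, (PySem.Dict.mk idx2ty).contains i = true) :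
    pvAInner idx2ty ids =
      ((((pvCut (pvEosIds idx2ty) ids).filter (fun i => !(PySem.Set.contains (pvSosIds idx2ty) i))).map
          (pvTok idx2ty)).map (fun t => t ++ [' '])).flatten := by
  induction ids with
  | nil => simp [pvAInner, pvCut]
  | cons i rest ih =>
    have hi : (PySem.Dict.mk idx2ty).contains i = true := h i (by simp)
    have hrest := ih (fun j hj => h j (by simp [hj]))
    obtain ⟨token, htok⟩ : ∃ t, pvLookup idx2ty i = some t := by
      cases hc : pvLookup idx2ty i with
      | none =>
        rw [PySem.Dict.contains_eq_isSome_get?] at hi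
        simp [pvLookup] at hc; simp [hc] at hi
      | some t => exact ⟨t, rfl⟩
    have heos : i ∈ pvEosIds idx2ty ↔ token = "<TY_EOS>" := by
      rw [← PySem.Set.contains_iff, pvEosIds, mem_sentinel_set idx2ty _ i hnd]
      simp only [pvLookup] at htok
      simp [htok]
    have hsos : i ∈ pvSosIds idx2ty ↔ token = "<TY_SOS>" := by
      rw [← PySem.Set.contains_iff, pvSosIds, mem_sentinel_set idx2ty _ i hnd]
      simp only [pvLookup] at htok
      simp [htok]
    by_cases he : token = "<TY_EOS>"
    · subst he
      simp [pvAInner, pvCut, htok, heos.mpr rfl]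
    · have h1 : i ∉ pvEosIds idx2ty := fun hc => he (heos.mp hc)
      by_cases hs : token = "<TY_SOS>"
      · subst hs
        simp [pvAInner, pvCut, htok, h1, hsos.mpr rfl, hrest]
      · have h2 : i ∉ pvSosIds idx2ty := fun hc => hs (hsos.mp hc)
        have h3 : pvTok idx2ty i = token.toList := by
          simp only [pvTok, pvLookup] at htok ⊢; simp [htok]
        simp [pvAInner, pvCut, htok, h1, h2, h3, hs, he, hrest]

theorem rstrip_append_space (s : List Char) :
    PySem.Chars.rstrip (s ++ [' ']) = PySem.Chars.rstrip s := by
  simp [PySem.Chars.rstrip, PySem.Chars.isspace]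

theorem strip_append_space (s : List Char) :
    PySem.Chars.strip (s ++ [' ']) = PySem.Chars.strip s := by
  simp only [PySem.Chars.strip, PySem.Chars.lstrip, List.dropWhile_append]
  by_cases h : (List.dropWhile PySem.Chars.isspace s).isEmpty
  · simp [List.isEmpty_iff.mp h, List.dropWhile, PySem.Chars.isspace, PySem.Chars.rstrip]
  · simpa [h] using rstrip_append_space (List.dropWhile PySem.Chars.isspace s)

-- glue-a-space-after-each vs intercalate-a-space: identical up to one trailing space
theorem flatten_map_space (ts : List (List Char)) (h : ts ≠ []) :
    (ts.map (fun t => t ++ [' '])).flatten = PySem.Chars.join [' '] ts ++ [' '] := by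
  induction ts with
  | nil => cases h rfl
  | cons t ts ih =>
    cases ts with
    | nil => simp [PySem.Chars.join, List.intercalate]
    | cons u us =>
      have hj : PySem.Chars.join [' '] (t :: u :: us) =
          t ++ [' '] ++ PySem.Chars.join [' '] (u :: us) := by
        simp [PySem.Chars.join, List.intercalate, List.intersperse]
      rw [List.map_cons, List.flatten_cons, ih (by simp), hj]
      simp

theorem strip_flatten_eq_strip_join (ts : List (List Char)) :
    PySem.Chars.strip ((ts.map (fun t => t ++ [' '])).flatten) =
      PySem.Chars.strip (PySem.Chars.join [' '] ts) := by
  cases ts with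
  | nil => simp [PySem.Chars.join, List.intercalate]
  | cons t ts => rw [flatten_map_space _ (by simp), strip_append_space]

theorem pvDecode_eq (idx2ty : List (Int × String)) (hnd : (idx2ty.map Prod.fst).Nodup)
    (ids : List Int) (h : ∀ i ∈ ids, (PySem.Dict.mk idx2ty).contains i = true) :
    String.ofList (PySem.Chars.strip (pvAInner idx2ty ids)) =
      pvDecodeB idx2ty (pvEosIds idx2ty) (pvSosIds idx2ty) ids := by
  rw [pvAInner_eq idx2ty hnd ids h, pvDecodeB, strip_flatten_eq_strip_join]

-- ===== VERDICT (by name: the statement is the Claim_ definition above) =====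
theorem convert2type_topk_spec : Claim_equal_convert2type_topk := by
  intro output_ids idx2ty _ hpre
  unfold Spec_convert2type_topk convert2type_topk convert2type_topk_alt
  rw [PySem.List.foldl_append_singleton_eq_map]
  refine List.map_congr_left (fun per hper => ?_)
  rw [PySem.List.foldl_append_singleton_eq_map]
  exact List.map_congr_left (fun ids hids =>
    pvDecode_eq idx2ty hpre.2 ids (hpre.1 per hper ids hids))
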